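-- pv_equiv track=rewrite | github.com/heitorchang/learn-code | hackerrank/compete/week_of_code_34/magic_cards.py | query
-- ===== SOURCE A (Python) =====
-- def sumSq(s):
--     tot = 0
--     for elem in s:
--         tot += elem ** 2
--     return tot
--
-- def selection(cards, choice):
--     bitStr = list(bin(choice)[2:].zfill(len(cards)))
--     # pr('bitStr')
--     nums = set()
--     for i, b in enumerate(bitStr):
--         # pr('cards[i][0]')
--         if b == '0':  # visible
--             nums.update(cards[i][0])
--         else:
--             nums.update(cards[i][1])
--     return nums
--
-- def query(cards, L, R):
--     # convert to 0-based
--     L -= 1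
--     R -= 1
--     cardSubset = cards[L:R+1]
--
--     # pr('cardSubset')
--
--     # prepare choices (to be converted to bit strings)
--     maxChoice = 2 ** len(cardSubset)
--     maxTot = 0
--     for c in range(maxChoice):
--         s = selection(cardSubset, c)
--         selSumSq = sumSq(s)
--         if selSumSq > maxTot:
--             maxTot = selSumSq
--         # pr('c s')
--     return maxTot
-- ===== SOURCE B (Python) =====
-- def query(cards, L, R):
--     sub = cards[L - 1:R]
--
--     def best(rest, acc):
--         first = rest[0]
--         lo = acc.union(first[0])
--         hi = acc.union(first[1])
--         if len(rest) == 1: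
--             return max(sum(e * e for e in lo), sum(e * e for e in hi))
--         return max(best(rest[1:], lo), best(rest[1:], hi))
--
--     return best(sub, set())
-- ===== Notes on version B (the rewrite author's own statement) =====
-- stated objective: alternative
-- what changed: A enumerates side choices by looping an integer over range(2**n) and decoding each into a zero-filled bit string that indexes the cards; B does a structural recursion over the card list, threading the accumulated union set and taking the max of the two recursive branches at each card.
import Mathlib
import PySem

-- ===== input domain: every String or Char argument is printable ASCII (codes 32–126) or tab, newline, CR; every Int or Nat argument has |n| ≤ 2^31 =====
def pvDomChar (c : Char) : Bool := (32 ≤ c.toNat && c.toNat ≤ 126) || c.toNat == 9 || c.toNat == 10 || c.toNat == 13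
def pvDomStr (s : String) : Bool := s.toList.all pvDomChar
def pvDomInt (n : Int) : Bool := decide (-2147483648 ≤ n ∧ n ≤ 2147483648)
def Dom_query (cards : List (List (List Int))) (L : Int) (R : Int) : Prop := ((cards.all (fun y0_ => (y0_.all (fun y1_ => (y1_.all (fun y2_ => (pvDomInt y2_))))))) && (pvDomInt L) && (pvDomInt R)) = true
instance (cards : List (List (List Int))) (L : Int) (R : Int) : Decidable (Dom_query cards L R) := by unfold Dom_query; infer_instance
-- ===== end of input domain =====

-- B replaces A's integer-loop-plus-decoded-bit-string enumeration of side choices by a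
-- structural recursion over the card list that threads the accumulated union set (alternative
-- decomposition, same cost class).

-- ===== PORT A =====
def sumSq (s : PySem.Set Int) : Int :=
  s.foldl (fun tot elem => tot + elem ^ 2) 0

-- cards[i][0] / cards[i][1] are ported with pyGetD (total form of indexing); Pre_query keeps
-- every such index in range, exactly where the Python returns instead of raising IndexError.
def selection (cards : List (List (List Int))) (choice : Int) : PySem.Set Int :=
  let bitStr : List Char :=
    PySem.Chars.zfill (PySem.List.slice (PySem.Int.toBinChars0b choice) (some 2) none)
      (cards.length : Int)
  (PySem.List.enumerate bitStr).foldl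
    (fun nums ib =>
      if ib.2 == '0' then
        PySem.Set.update nums (PySem.List.pyGetD (PySem.List.pyGetD cards ib.1 []) 0 [])
      else
        PySem.Set.update nums (PySem.List.pyGetD (PySem.List.pyGetD cards ib.1 []) 1 []))
    PySem.Set.empty

def query (cards : List (List (List Int))) (L : Int) (R : Int) : Int :=
  let L1 := L - 1
  let R1 := R - 1
  let cardSubset := PySem.List.slice cards (some L1) (some (R1 + 1))
  let maxChoice : Int := 2 ^ cardSubset.length
  (PySem.List.pyRange 0 maxChoice 1).foldl
    (fun maxTot c =>
      let s := selection cardSubset c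
      let selSumSq := sumSq s
      if selSumSq > maxTot then selSumSq else maxTot)
    0

-- ===== PORT B =====
-- rest[0][0] / rest[0][1] ported with pyGetD, in range under Pre_query (as for A);
-- on an empty rest the Python raises IndexError (excluded by Pre_query), the port returns 0.
def best : List (List (List Int)) → PySem.Set Int → Int
  | [], _acc => 0
  | first :: rest, acc =>
    let lo := PySem.Set.union acc (PySem.List.pyGetD first 0 [])
    let hi := PySem.Set.union acc (PySem.List.pyGetD first 1 [])
    match rest with
    | [] => max ((lo.map (fun e => e * e)).sum) ((hi.map (fun e => e * e)).sum)
    | _ :: _ => max (best rest lo) (best rest hi)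

def query_alt (cards : List (List (List Int))) (L : Int) (R : Int) : Int :=
  best (PySem.List.slice cards (some (L - 1)) (some R)) PySem.Set.empty

-- ===== PRECONDITION & SPEC =====
-- Pre_query: the Python A raises IndexError exactly when the selected slice is empty (its
-- bit string '0' still indexes cards[0]) or some selected card has fewer than two sides.
def Pre_query (cards : List (List (List Int))) (L : Int) (R : Int) : Prop :=
  PySem.List.slice cards (some (L - 1)) (some R) ≠ [] ∧
  ∀ card ∈ PySem.List.slice cards (some (L - 1)) (some R), 2 ≤ card.length
instance (cards : List (List (List Int))) (L : Int) (R : Int) : Decidable (Pre_query cards L R) := by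
  unfold Pre_query; infer_instance

def pvWitness_query : List (List (List Int)) × Int × Int := ([[[1], [2]]], 1, 1)

def Spec_query (cards : List (List (List Int))) (L : Int) (R : Int) (out : Int) : Prop :=
  out = query_alt cards L R
instance (cards : List (List (List Int))) (L : Int) (R : Int) (out : Int) : Decidable (Spec_query cards L R out) := by
  unfold Spec_query; infer_instance

-- ===== CLAIM (what is proved, stated in full; the proofs are below) =====
def Claim_equal_query : Prop := ∀ (cards : List (List (List Int))) (L : Int) (R : Int), Dom_query cards L R → Pre_query cards L R → Spec_query cards L R (query cards L R)


-- ===== LEMMAS AND PROOFS =====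

-- the n-character big-endian binary spelling of c, as A's zfilled bit string denotes it
def bitsL : Nat → Nat → List Char
  | _, 0 => []
  | c, n + 1 => bitsL (c / 2) n ++ [if c % 2 = 1 then '1' else '0']

-- A's selection loop, read off against the card list: one update per (card, bit) pair
def selZip : List (List (List Int)) → List Char → PySem.Set Int → PySem.Set Int
  | _, [], s => s
  | cs, b :: bs, s =>
    selZip cs.tail bs
      (PySem.Set.update s
        (PySem.List.pyGetD (cs.headD []) (if b == '0' then 0 else 1) []))

theorem length_bitsL (n : Nat) : ∀ c, (bitsL c n).length = n := by
  induction n with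
  | zero => intro c; rfl
  | succ n ih => intro c; simp [bitsL, ih]

theorem bitsL_zero_left : ∀ n, bitsL 0 n = List.replicate n '0' := by
  intro n
  induction n with
  | zero => rfl
  | succ n ih => simp [bitsL, ih, List.replicate_succ']

theorem toDigits_two_ne_sign (c : Nat) :
    ∃ d rest, Nat.toDigits 2 c = d :: rest ∧ d ≠ '+' ∧ d ≠ '-' := by
  induction c using Nat.strong_induction_on with
  | _ c ih =>
    rw [Nat.toDigits_eq_if (by norm_num)]
    by_cases h : c < 2
    · refine ⟨c.digitChar, [], by simp [h], ?_, ?_⟩ <;> interval_cases c <;> decide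
    · obtain ⟨d, rest, heq, h1, h2⟩ := ih (c / 2) (by omega)
      exact ⟨d, rest ++ [(c % 2).digitChar], by simp [h, heq], h1, h2⟩

theorem zfill_digits (t : List Char) (w : Nat) (h1 : t ≠ [])
    (h2 : ∀ d rest, t = d :: rest → d ≠ '+' ∧ d ≠ '-') :
    PySem.Chars.zfill t (w : Int) = List.replicate (w - t.length) '0' ++ t := by
  match t, h1 with
  | d :: rest, _ =>
    obtain ⟨hp, hm⟩ := h2 d rest rfl
    have hns : ¬ (d = '+' ∨ d = '-') := by tauto
    simp only [PySem.Chars.zfill]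
    split_ifs with hw
    · have h0 : w - (d :: rest).length = 0 := by
        simp only [List.length_cons] at hw ⊢
        omega
      rw [h0, List.replicate_zero, List.nil_append]
    · simp

theorem repForm : ∀ n c, c < 2 ^ (n + 1) →
    List.replicate ((n + 1) - (Nat.toDigits 2 c).length) '0' ++ Nat.toDigits 2 c
      = bitsL c (n + 1) := by
  intro n
  induction n with
  | zero =>
    intro c hc
    rw [Nat.toDigits_of_lt_base (by omega)]
    interval_cases c <;> decide
  | succ n ih =>
    intro c hc
    rw [Nat.toDigits_eq_if (by norm_num)]
    by_cases h : c < 2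
    · have hd : c / 2 = 0 := by omega
      simp only [if_pos h, bitsL, hd]
      have hc2 : c = 0 ∨ c = 1 := by omega
      rcases hc2 with rfl | rfl <;>
        simp [Nat.digitChar, List.replicate_succ', bitsL_zero_left]
    · have hlt : c / 2 < 2 ^ (n + 1) := by
        rw [pow_succ] at hc; omega
      have := ih (c / 2) hlt
      rw [if_neg h,
        show bitsL c (n + 1 + 1) = bitsL (c / 2) (n + 1) ++ [if c % 2 = 1 then '1' else '0'] from rfl]
      rw [List.length_append]
      have hlen : n + 1 + 1 - ((Nat.toDigits 2 (c / 2)).length + 1)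
          = n + 1 - (Nat.toDigits 2 (c / 2)).length := by omega
      rw [List.length_singleton, hlen, ← List.append_assoc, this]
      have h2 : c % 2 = 0 ∨ c % 2 = 1 := by omega
      rcases h2 with h2 | h2 <;> simp [h2, Nat.digitChar]

theorem zfill_toDigits (n c : Nat) (hc : c < 2 ^ (n + 1)) :
    PySem.Chars.zfill (Nat.toDigits 2 c) ((n + 1 : Nat) : Int) = bitsL c (n + 1) := by
  rw [zfill_digits _ _ (by
        have := @Nat.length_toDigits_pos 2 c
        intro h; rw [h] at this; simp at this)
      (by intro d rest h
          obtain ⟨d', r', heq, h1, h2⟩ := toDigits_two_ne_sign c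
          rw [h] at heq
          cases heq
          exact ⟨h1, h2⟩)]
  exact repForm n c hc

theorem bitsL_split : ∀ (n c : Nat), c < 2 ^ (n + 1) →
    bitsL c (n + 1) = (if c < 2 ^ n then '0' else '1') :: bitsL (c % 2 ^ n) n := by
  intro n
  induction n with
  | zero =>
    intro c hc
    have : c = 0 ∨ c = 1 := by omega
    rcases this with rfl | rfl <;> decide
  | succ n ih =>
    intro c hc
    have hlt : c / 2 < 2 ^ (n + 1) := by rw [pow_succ] at hc; omega
    have step : bitsL c (n + 1 + 1)
        = bitsL (c / 2) (n + 1) ++ [if c % 2 = 1 then '1' else '0'] := rfl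
    rw [step, ih (c / 2) hlt]
    have e1 : c / 2 < 2 ^ n ↔ c < 2 ^ (n + 1) := by
      rw [pow_succ]
      omega
    have e2 : c % 2 ^ (n + 1) / 2 = c / 2 % 2 ^ n := by
      have : (2 : Nat) ^ (n + 1) = 2 * 2 ^ n := by ring
      rw [this, Nat.mod_mul_right_div_self]
    have e3 : c % 2 ^ (n + 1) % 2 = c % 2 :=
      Nat.mod_mod_of_dvd c ⟨2 ^ n, by ring⟩
    have step2 : bitsL (c % 2 ^ (n + 1)) (n + 1)
        = bitsL (c % 2 ^ (n + 1) / 2) n ++ [if c % 2 ^ (n + 1) % 2 = 1 then '1' else '0'] := rfl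
    rw [step2, e2, e3]
    by_cases h : c < 2 ^ (n + 1)
    · simp [h, e1.mpr h, List.cons_append]
    · have h' : ¬ c / 2 < 2 ^ n := fun hh => h (e1.mp hh)
      simp [h, h', List.cons_append]

theorem selection_loop (cards : List (List (List Int))) :
    ∀ (bs : List Char) (k : Nat) (nums : PySem.Set Int), k + bs.length = cards.length →
    (PySem.List.enumerate bs (k : Int)).foldl
      (fun nums ib =>
        if ib.2 == '0' then
          PySem.Set.update nums (PySem.List.pyGetD (PySem.List.pyGetD cards ib.1 []) 0 [])
        else
          PySem.Set.update nums (PySem.List.pyGetD (PySem.List.pyGetD cards ib.1 []) 1 []))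
      nums
    = selZip (cards.drop k) bs nums := by
  intro bs
  induction bs with
  | nil => intro k nums _; simp [selZip, PySem.List.enumerate]
  | cons b bs ih =>
    intro k nums hlen
    rw [PySem.List.enumerate_cons]
    have hc : ((k : Int) + 1) = ((k + 1 : Nat) : Int) := by push_cast; ring
    rw [List.foldl_cons, hc, ih (k + 1) _ (by simp at hlen ⊢; omega)]
    have hget : PySem.List.pyGetD cards (k : Int) [] = (cards.drop k).headD [] := by
      rw [PySem.List.pyGetD_natCast]
      rw [List.getD_eq_getElem?_getD, List.headD_eq_head?_getD, List.head?_drop]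
    have htail : (cards.drop k).tail = cards.drop (k + 1) := by
      rw [List.tail_drop]
    conv_rhs => rw [selZip]
    rw [htail, ← hget]
    by_cases hb : b == '0' <;> simp [hb]

theorem sumSq_eq_b (acc : PySem.Set Int) : sumSq acc = (acc.map (fun e => e * e)).sum := by
  unfold sumSq
  rw [PySem.List.foldl_add acc (fun e => e ^ 2) 0, zero_add]
  simp only [pow_two]

theorem selection_eq_selZip (sub : List (List (List Int))) (n : Nat) (k : Nat)
    (hn : sub.length = n + 1) (hk : k < 2 ^ (n + 1)) :
    selection sub (k : Int) = selZip sub (bitsL k sub.length) PySem.Set.empty := by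
  unfold selection
  have h0 : PySem.Int.toBinChars0b (k : Int) = '0' :: 'b' :: Nat.toDigits 2 k := by
    simp [PySem.Int.toBinChars0b]
  have h1 : PySem.List.slice ('0' :: 'b' :: Nat.toDigits 2 k) (some 2) none
      = Nat.toDigits 2 k := by
    have := PySem.List.slice_from (xs := '0' :: 'b' :: Nat.toDigits 2 k)
      (a := 2) (by norm_num)
    rw [this]
    rfl
  rw [h0, h1, hn, zfill_toDigits n k hk]
  have := selection_loop sub (bitsL k (n + 1)) 0 PySem.Set.empty
    (by simp [length_bitsL, hn])
  simpa [hn] using this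

theorem if_gt_eq_max (a b : Int) : (if a > b then a else b) = max b a := by
  rw [max_def]; split_ifs <;> omega

theorem sq_sum_nonneg (s : PySem.Set Int) : 0 ≤ (s.map (fun e => e * e)).sum := by
  apply List.sum_nonneg
  intro x hx
  obtain ⟨e, _, rfl⟩ := List.mem_map.1 hx
  exact mul_self_nonneg e

theorem best_nonneg : ∀ (sub : List (List (List Int))) (acc : PySem.Set Int),
    0 ≤ best sub acc := by
  intro sub
  induction sub with
  | nil => intro acc; exact le_refl 0
  | cons first rest ih =>
    intro acc
    simp only [best]
    match rest, ih with
    | [], _ => exact le_max_of_le_left (sq_sum_nonneg _)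
    | r :: rs, ih => exact le_max_of_le_left (ih _)

theorem main_fold : ∀ (sub : List (List (List Int))) (acc : PySem.Set Int) (m0 : Int),
      sub ≠ [] →
      (List.range (2 ^ sub.length)).foldl
        (fun m c => max m (sumSq (selZip sub (bitsL c sub.length) acc))) m0
      = max m0 (best sub acc) := by
  intro sub
  induction sub with
  | nil => intro acc m0 h; exact absurd rfl h
  | cons first rest ih =>
    intro acc m0 _
    match rest, ih with
    | [], _ =>
      show (List.range (2 ^ 1)).foldl _ m0 = _
      rw [show List.range (2 ^ 1) = [0, 1] from rfl, List.foldl_cons, List.foldl_cons,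
        List.foldl_nil]
      rw [show bitsL 0 [first].length = ['0'] from rfl, show bitsL 1 [first].length = ['1'] from rfl]
      rw [show ∀ s, selZip [first] ['0'] s
            = PySem.Set.update s (PySem.List.pyGetD first 0 []) from fun _ => rfl,
        show ∀ s, selZip [first] ['1'] s
            = PySem.Set.update s (PySem.List.pyGetD first 1 []) from fun _ => rfl]
      rw [sumSq_eq_b, sumSq_eq_b]
      show _ = max m0 (max _ _)
      rw [max_assoc]
      rfl
    | r :: rs, ih =>
      have hlen : (first :: r :: rs).length = (r :: rs).length + 1 := rfl
      have hsplit : (2 : Nat) ^ ((r :: rs).length + 1)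
          = 2 ^ (r :: rs).length + 2 ^ (r :: rs).length := by ring
      rw [hlen, hsplit, List.range_add, List.foldl_append, List.foldl_map]
      have step0 : ∀ (m : Int), ∀ c ∈ List.range (2 ^ (r :: rs).length),
          max m (sumSq (selZip (first :: r :: rs) (bitsL c ((r :: rs).length + 1)) acc))
          = max m (sumSq (selZip (r :: rs) (bitsL c (r :: rs).length)
              (PySem.Set.update acc (PySem.List.pyGetD first 0 [])))) := by
        intro m c hc
        rw [List.mem_range] at hc
        rw [bitsL_split (r :: rs).length c (by omega), if_pos hc, Nat.mod_eq_of_lt hc]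
        rfl
      have step1 : ∀ (m : Int), ∀ c ∈ List.range (2 ^ (r :: rs).length),
          max m (sumSq (selZip (first :: r :: rs)
              (bitsL (2 ^ (r :: rs).length + c) ((r :: rs).length + 1)) acc))
          = max m (sumSq (selZip (r :: rs) (bitsL c (r :: rs).length)
              (PySem.Set.update acc (PySem.List.pyGetD first 1 [])))) := by
        intro m c hc
        rw [List.mem_range] at hc
        have hcc : 2 ^ (r :: rs).length + c < 2 ^ ((r :: rs).length + 1) := by
          rw [pow_succ]; omega
        rw [bitsL_split (r :: rs).length _ hcc, if_neg (by omega), Nat.add_mod_left,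
          Nat.mod_eq_of_lt hc]
        rfl
      rw [PySem.List.foldl_congr_mem _ _ _ _ step0, ih _ _ (by simp)]
      rw [PySem.List.foldl_congr_mem _ _ _ _ step1, ih _ _ (by simp)]
      show _ = max m0 (best (first :: r :: rs) acc)
      rw [show best (first :: r :: rs) acc
            = max (best (r :: rs) (PySem.Set.union acc (PySem.List.pyGetD first 0 [])))
                  (best (r :: rs) (PySem.Set.union acc (PySem.List.pyGetD first 1 []))) from rfl]
      rw [max_assoc]
      rfl

theorem query_eq (cards : List (List (List Int))) (L R : Int)
    (hne : PySem.List.slice cards (some (L - 1)) (some R) ≠ []) :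
    query cards L R = query_alt cards L R := by
  unfold query query_alt
  simp only []
  have hRR : R - 1 + 1 = R := by ring
  rw [hRR]
  set sub := PySem.List.slice cards (some (L - 1)) (some R) with hsub
  obtain ⟨n, hn⟩ : ∃ n, sub.length = n + 1 := by
    cases h : sub with
    | nil => exact absurd h hne
    | cons a l => exact ⟨l.length, rfl⟩
  have hpow : ((2 : Int) ^ sub.length - 0).toNat = 2 ^ sub.length := by
    have : (2 : Int) ^ sub.length = ((2 ^ sub.length : Nat) : Int) := by push_cast; ring
    rw [this, sub_zero, Int.toNat_natCast]
  rw [PySem.List.pyRange_one, hpow, List.foldl_map]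
  have hcongr : ∀ (m : Int), ∀ k ∈ List.range (2 ^ sub.length),
      (fun maxTot c =>
        let s := selection sub c
        let selSumSq := sumSq s
        if selSumSq > maxTot then selSumSq else maxTot) m ((0 : Int) + (k : Nat))
      = max m (sumSq (selZip sub (bitsL k sub.length) PySem.Set.empty)) := by
    intro m k hk
    rw [List.mem_range] at hk
    simp only [zero_add]
    rw [selection_eq_selZip sub n k hn (hn ▸ hk)]
    exact if_gt_eq_max _ _

  rw [PySem.List.foldl_congr_mem _ _ _ _ hcongr, main_fold sub PySem.Set.empty 0 hne]
  exact max_eq_right (best_nonneg sub PySem.Set.empty)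

-- ===== VERDICT (by name: the statement is the Claim_ definition above) =====
theorem query_spec : Claim_equal_query := by
  intro cards L R _ hpre
  unfold Spec_query
  exact query_eq cards L R hpre.1
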